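-- pv_equiv track=rewrite | github.com/daalgi/algorithms | combinatorics/conditional_combinations.py | conditional_combinations
-- ===== SOURCE A (Python) =====
-- from itertools import combinations
--
-- def conditional_combinations(iterable, r, pair_incompatibilities: set = None):
--     pool = tuple(iterable)
--     n = len(pool)
--     if r > n:
--         return
--     indices = list(range(r))
--     yield tuple(pool[i] for i in indices)
--     while True:
--         # Determine the index `i` that will increment by 1
--         for i in reversed(range(r)):
--             if indices[i] != i + n - r:
--                 break
--         else:
--             # Last combination reached
--             return
--         indices[i] += 1
--         for j in range(i + 1, r):
--             indices[j] = indices[j - 1] + 1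
--
--         current_combination = tuple(pool[i] for i in indices)
--
--         # Check if the current combination has incompatibilities
--         if pair_incompatibilities and any(
--             c in pair_incompatibilities for c in combinations(current_combination, 2)
--         ):
--             continue
--
--         yield current_combination
-- ===== SOURCE B (Python) =====
-- def conditional_combinations(iterable, r, pair_incompatibilities: set = None):
--     # Backtracking DFS over the pool: extend a partial combination one element at a
--     # time and prune a branch as soon as the new element forms an incompatible pair
--     # with an already chosen one.  Unlike A, the very first combination is checked too.
--     pool = tuple(iterable)
--     n = len(pool)
--     if r > n:
--         return
--
--     def dfs(start, chosen):
--         if r - len(chosen) <= 0: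
--             yield tuple(chosen)
--             return
--         for idx in range(start, n - (r - len(chosen)) + 1):
--             v = pool[idx]
--             if pair_incompatibilities and any(
--                 (c, v) in pair_incompatibilities for c in chosen
--             ):
--                 continue
--             yield from dfs(idx + 1, chosen + [v])
--
--     yield from dfs(0, [])
-- ===== Notes on version B (the rewrite author's own statement) =====
-- stated objective: alternative
-- what changed: Replaced A's iterate-all-index-successors-then-filter loop by a backtracking DFS that extends a partial combination element by element and prunes a subtree as soon as a newly added element forms an incompatible pair with an already chosen one; B also checks the first combination, which A yields unchecked.
-- intended difference: On inputs where r <= len(iterable) and the first r elements of iterable already contain an incompatible pair, A yields that first combination without checking it (it only filters combinations produced by the successor loop), while B excludes it like every other combination; filtering it is evidently the function's intent. — e.g. on conditional_combinations([1, 2, 3], 2, [(1, 2)]): A returns [[1, 2], [1, 3], [2, 3]], B returns [[1, 3], [2, 3]]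
import Mathlib
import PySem

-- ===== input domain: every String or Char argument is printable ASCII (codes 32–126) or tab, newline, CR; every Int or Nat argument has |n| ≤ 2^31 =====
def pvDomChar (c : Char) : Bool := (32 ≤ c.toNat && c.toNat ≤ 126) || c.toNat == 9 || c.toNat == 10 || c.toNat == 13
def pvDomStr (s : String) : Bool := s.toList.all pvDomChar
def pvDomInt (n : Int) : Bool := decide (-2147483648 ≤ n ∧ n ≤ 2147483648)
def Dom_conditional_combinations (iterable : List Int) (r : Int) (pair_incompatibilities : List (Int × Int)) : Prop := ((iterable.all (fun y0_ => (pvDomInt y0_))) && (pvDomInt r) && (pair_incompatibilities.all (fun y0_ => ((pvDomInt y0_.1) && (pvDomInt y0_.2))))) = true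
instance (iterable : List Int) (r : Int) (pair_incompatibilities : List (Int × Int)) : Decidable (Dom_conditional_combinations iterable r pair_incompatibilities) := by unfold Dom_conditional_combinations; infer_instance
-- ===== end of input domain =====

-- B replaces A's iterate-every-index-successor-then-filter loop by a pruning backtracking
-- DFS; unlike A, B also checks the FIRST combination (A yields it unchecked), stated as D_ below.

-- ===== PORT A =====

-- itertools.combinations(l, 2), in Python's order
def pairs2 : List Int → List (Int × Int)
  | [] => []
  | x :: xs => (xs.map (fun y => (x, y))) ++ pairs2 xs

-- the `while True` loop of A; fuel is a termination guard only (never exhausted on the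
-- states A reaches).  Indices manipulated by Python are always in range, so pyGetD/.set
-- with .toNat are exact here.
def loopA (pool : List Int) (n rI : Int) (pairs : List (Int × Int)) (indices : List Int) : Nat → List (List Int)
  | 0 => []
  | fuel + 1 =>
    match ((PySem.List.pyRange 0 rI 1).reverse).find?
        (fun i => decide (PySem.List.pyGetD indices i 0 ≠ i + n - rI)) with
    | none => []
    | some i =>
      let indices1 := indices.set i.toNat (PySem.List.pyGetD indices i 0 + 1)
      let indices2 := (PySem.List.pyRange (i + 1) rI 1).foldl
          (fun idx j => idx.set j.toNat (PySem.List.pyGetD idx (j - 1) 0 + 1)) indices1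
      let comb := indices2.map (fun k => PySem.List.pyGetD pool k 0)
      if (!pairs.isEmpty) && ((pairs2 comb).any (fun c => pairs.contains c)) then
        loopA pool n rI pairs indices2 fuel
      else comb :: loopA pool n rI pairs indices2 fuel

def conditional_combinations (iterable : List Int) (r : Int) (pair_incompatibilities : List (Int × Int)) : List (List Int) :=
  let pool := iterable
  let n : Int := pool.length
  if r > n then []
  else
    let indices := PySem.List.pyRange 0 r 1
    let first := indices.map (fun i => PySem.List.pyGetD pool i 0)
    first :: loopA pool n r pair_incompatibilities indices (Nat.choose n.toNat r.toNat + 1)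

-- ===== PORT B =====

-- backtracking DFS: extend `chosen`; prune as soon as the new element is incompatible.
-- fuel is a termination guard only (fuel ≥ r - len(chosen) on every call made).
def dfsB (pool : List Int) (pairs : List (Int × Int)) (rI n : Int) : Nat → Int → List Int → List (List Int)
  | 0, _start, chosen => if rI - chosen.length ≤ 0 then [chosen] else []
  | fuel + 1, start, chosen =>
    if rI - chosen.length ≤ 0 then [chosen]
    else
      (PySem.List.pyRange start (n - (rI - chosen.length) + 1) 1).flatMap (fun idx =>
        let v := PySem.List.pyGetD pool idx 0
        if (!pairs.isEmpty) && (chosen.any (fun c => pairs.contains (c, v))) then []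
        else dfsB pool pairs rI n fuel (idx + 1) (chosen ++ [v]))

def conditional_combinations_alt (iterable : List Int) (r : Int) (pair_incompatibilities : List (Int × Int)) : List (List Int) :=
  if r > (iterable.length : Int) then []
  else dfsB iterable pair_incompatibilities r iterable.length r.toNat 0 []

-- ===== PRECONDITION & SPEC =====

-- On inputs where r ≤ len(iterable) and the first r elements already contain an
-- incompatible pair, A yields that first combination unchecked (its loop only filters
-- the combinations the successor step produces) while B excludes it like every other
-- combination, which is evidently the function's intent.
def D_conditional_combinations (iterable : List Int) (r : Int) (pair_incompatibilities : List (Int × Int)) : Prop :=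
  r ≤ (iterable.length : Int) ∧
    ¬ (iterable.take r.toNat).Pairwise (fun a b => (a, b) ∉ pair_incompatibilities)

instance (iterable : List Int) (r : Int) (pair_incompatibilities : List (Int × Int)) : Decidable (D_conditional_combinations iterable r pair_incompatibilities) := by
  unfold D_conditional_combinations; infer_instance

def Spec_conditional_combinations (iterable : List Int) (r : Int) (pair_incompatibilities : List (Int × Int)) (out : List (List Int)) : Prop := ¬ D_conditional_combinations iterable r pair_incompatibilities → out = conditional_combinations_alt iterable r pair_incompatibilities
instance (iterable : List Int) (r : Int) (pair_incompatibilities : List (Int × Int)) (out : List (List Int)) : Decidable (Spec_conditional_combinations iterable r pair_incompatibilities out) := by unfold Spec_conditional_combinations; infer_instance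

def pvDiffWitness_conditional_combinations : List Int × Int × (List (Int × Int)) := ([1, 2, 3], 2, [(1, 2)])
def pvDiffWitnessOut_conditional_combinations : (List (List Int)) × (List (List Int)) :=
  ([[1, 2], [1, 3], [2, 3]], [[1, 3], [2, 3]])

-- ===== CLAIM (what is proved, stated in full; the proofs are below) =====
def Claim_unchanged_conditional_combinations : Prop := ∀ (iterable : List Int) (r : Int) (pair_incompatibilities : List (Int × Int)), Dom_conditional_combinations iterable r pair_incompatibilities → Spec_conditional_combinations iterable r pair_incompatibilities (conditional_combinations iterable r pair_incompatibilities)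
def Claim_changed_conditional_combinations : Prop := Dom_conditional_combinations (pvDiffWitness_conditional_combinations.1) (pvDiffWitness_conditional_combinations.2.1) (pvDiffWitness_conditional_combinations.2.2) ∧ D_conditional_combinations (pvDiffWitness_conditional_combinations.1) (pvDiffWitness_conditional_combinations.2.1) (pvDiffWitness_conditional_combinations.2.2) ∧ conditional_combinations (pvDiffWitness_conditional_combinations.1) (pvDiffWitness_conditional_combinations.2.1) (pvDiffWitness_conditional_combinations.2.2) = pvDiffWitnessOut_conditional_combinations.1 ∧ conditional_combinations_alt (pvDiffWitness_conditional_combinations.1) (pvDiffWitness_conditional_combinations.2.1) (pvDiffWitness_conditional_combinations.2.2) = pvDiffWitnessOut_conditional_combinations.2 ∧ pvDiffWitnessOut_conditional_combinations.1 ≠ pvDiffWitnessOut_conditional_combinations.2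
def Claim_exact_conditional_combinations : Prop := ∀ (iterable : List Int) (r : Int) (pair_incompatibilities : List (Int × Int)), Dom_conditional_combinations iterable r pair_incompatibilities → D_conditional_combinations iterable r pair_incompatibilities → conditional_combinations iterable r pair_incompatibilities ≠ conditional_combinations_alt iterable r pair_incompatibilities

-- ===== LEMMAS AND PROOFS =====

-- [a, a+1, …, a+k-1] as Ints
def intRange (b : Int) : Nat → List Int
  | 0 => []
  | k + 1 => b :: intRange (b + 1) k

-- all index combinations of size k from [lo, n), lexicographically (proof-side spec)
def combsFrom (n lo : Int) (k : Nat) : List (List Int) :=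
  match k with
  | 0 => [[]]
  | k' + 1 =>
    if h : n ≤ lo then []
    else ((combsFrom n (lo + 1) k').map (fun c => lo :: c)) ++ combsFrom n (lo + 1) (k' + 1)
termination_by (n - lo).toNat
decreasing_by all_goals (simp at h; omega)

theorem combsFrom_length : ∀ (n lo : Int) (k : Nat), (combsFrom n lo k).length = Nat.choose (n - lo).toNat k := by
  intro n lo k
  fun_induction combsFrom n lo k with
  | case1 => simp
  | case2 lo k' hle =>
    have h0 : (n - lo).toNat = 0 := by omega
    rw [h0]
    rfl
  | case3 lo k' hlt ih1 ih2 =>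
    simp only [List.length_append, List.length_map, ih1, ih2]
    have h1 : (n - lo).toNat = (n - (lo + 1)).toNat + 1 := by omega
    rw [h1, Nat.choose_succ_succ]

-- all index combinations lexicographically AFTER `is`
def afterC (n : Int) : List Int → List (List Int)
  | [] => []
  | i :: rest => ((afterC n rest).map (fun c => i :: c)) ++ combsFrom n (i + 1) (rest.length + 1)

-- `is` is a strictly increasing list of indices in [lo, n)
def ValidFrom (n : Int) : Int → List Int → Prop
  | _, [] => True
  | lo, i :: rest => lo ≤ i ∧ i < n ∧ ValidFrom n (i + 1) rest

-- functional form of A's successor step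
def nextF (n : Int) : List Int → Option (List Int)
  | [] => none
  | i :: rest =>
    match nextF n rest with
    | some rest' => some (i :: rest')
    | none =>
      if i + rest.length + 2 ≤ n then some (intRange (i + 1) (rest.length + 1)) else none

def valsP (pool : List Int) (c : List Int) : List Int := c.map (fun k => PySem.List.pyGetD pool k 0)

def badL (pairs : List (Int × Int)) (l : List Int) : Bool :=
  (!pairs.isEmpty) && ((pairs2 l).any (fun c => pairs.contains c))

theorem intRange_length (b : Int) (k : Nat) : (intRange b k).length = k := by
  induction k generalizing b with
  | zero => rfl
  | succ k ih => simp [intRange, ih]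

theorem combsFrom_eq_nil {n lo : Int} {k : Nat} (hk : 0 < k) (h : n < lo + k) :
    combsFrom n lo k = [] := by
  fun_induction combsFrom n lo k with
  | case1 => omega
  | case2 => rfl
  | case3 lo k' hlt ih1 ih2 =>
    rw [ih2 (by omega) (by omega)]
    rcases Nat.eq_zero_or_pos k' with h0 | h0
    · omega
    · rw [ih1 h0 (by omega)]; simp

theorem combsFrom_eq_cons {n : Int} : ∀ {k : Nat} {lo : Int}, lo + k ≤ n →
    combsFrom n lo k = intRange lo k :: afterC n (intRange lo k) := by
  intro k
  induction k with
  | zero => intro lo h; simp [combsFrom, intRange, afterC]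
  | succ k ih =>
    intro lo h
    rw [combsFrom]
    rw [dif_neg (by omega)]
    rw [ih (lo := lo + 1) (by omega)]
    simp only [List.map_cons]
    rw [intRange, afterC, intRange_length]
    rw [List.cons_append]

theorem valid_mono {n lo lo' : Int} {is : List Int} (h : lo ≤ lo') (hv : ValidFrom n lo' is) :
    ValidFrom n lo is := by
  cases is with
  | nil => trivial
  | cons i rest => exact ⟨by have := hv.1; omega, hv.2.1, hv.2.2⟩

theorem valid_intRange {n : Int} : ∀ {k : Nat} {lo : Int}, lo + k ≤ n → ValidFrom n lo (intRange lo k) := by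
  intro k
  induction k with
  | zero => intro lo h; trivial
  | succ k ih => intro lo h; exact ⟨le_refl _, by omega, ih (by omega)⟩

theorem valid_bound {n : Int} : ∀ {rest : List Int} {lo i : Int},
    ValidFrom n lo (i :: rest) → i + rest.length < n := by
  intro rest
  induction rest with
  | nil => intro lo i h; simpa using h.2.1
  | cons j rs ih =>
    intro lo i h
    have h2 := ih h.2.2
    have h1 : i + 1 ≤ j := h.2.2.1
    simp at h2 ⊢
    omega

theorem nextF_length {n : Int} : ∀ {is is' : List Int}, nextF n is = some is' → is'.length = is.length := by
  intro is
  induction is with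
  | nil => intro is' h; simp [nextF] at h
  | cons i rest ih =>
    intro is' h
    rw [nextF] at h
    cases hn : nextF n rest with
    | some rest' =>
      rw [hn] at h
      cases h
      simp [ih hn]
    | none =>
      rw [hn] at h
      by_cases hc : i + rest.length + 2 ≤ n
      · rw [if_pos hc] at h
        cases h
        simp [intRange_length]
      · rw [if_neg hc] at h; cases h

theorem valid_nextF {n : Int} : ∀ {is : List Int} {lo : Int} {is' : List Int},
    ValidFrom n lo is → nextF n is = some is' → ValidFrom n lo is' := by
  intro is
  induction is with
  | nil => intro lo is' _ h; simp [nextF] at h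
  | cons i rest ih =>
    intro lo is' hv h
    rw [nextF] at h
    cases hn : nextF n rest with
    | some rest' =>
      rw [hn] at h
      cases h
      exact ⟨hv.1, hv.2.1, ih hv.2.2 hn⟩
    | none =>
      rw [hn] at h
      by_cases hc : i + rest.length + 2 ≤ n
      · rw [if_pos hc] at h
        cases h
        exact valid_mono (by have := hv.1; omega) (valid_intRange (by omega))
      · rw [if_neg hc] at h; cases h

theorem afterC_step {n : Int} : ∀ {is : List Int} {lo : Int}, ValidFrom n lo is →
    afterC n is = (match nextF n is with
                   | none => []
                   | some is' => is' :: afterC n is') := by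
  intro is
  induction is with
  | nil => intro lo _; rfl
  | cons i rest ih =>
    intro lo hv
    obtain ⟨h1, h2, h3⟩ := hv
    rw [afterC, nextF]
    cases hn : nextF n rest with
    | some rest' =>
      rw [ih h3, hn]
      simp only [List.map_cons]
      rw [afterC, nextF_length hn]
      rw [List.cons_append]
    | none =>
      rw [ih h3, hn]
      simp only [List.map_nil, List.nil_append]
      by_cases hc : i + rest.length + 2 ≤ n
      · rw [if_pos hc]
        exact combsFrom_eq_cons (by omega)
      · rw [if_neg hc]
        exact combsFrom_eq_nil (by omega) (by push_cast; omega)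

theorem afterC_none {n : Int} {is : List Int} {lo : Int} (hv : ValidFrom n lo is)
    (h : nextF n is = none) : afterC n is = [] := by
  have hs := afterC_step hv
  rw [h] at hs
  exact hs

theorem afterC_some {n : Int} {is is' : List Int} {lo : Int} (hv : ValidFrom n lo is)
    (h : nextF n is = some is') : afterC n is = is' :: afterC n is' := by
  have hs := afterC_step hv
  rw [h] at hs
  exact hs

-- Boolean pair lemmas -------------------------------------------------------

theorem pairs2_any_snoc (P : Int × Int → Bool) : ∀ (l : List Int) (v : Int),
    ((pairs2 (l ++ [v])).any P) = ((pairs2 l).any P || l.any (fun c => P (c, v))) := by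
  intro l
  induction l with
  | nil => intro v; simp [pairs2]
  | cons x xs ih =>
    intro v
    rw [Bool.eq_iff_iff]
    simp only [List.cons_append, pairs2, List.any_append, List.any_map, ih, List.any_cons,
      List.any_nil, Bool.or_eq_true, Function.comp, List.any_eq_true, Bool.false_eq_true,
      or_false]
    exact ⟨fun h => by rcases h with (h | h) | h | h
                       exacts [Or.inl (Or.inl h), Or.inr (Or.inl h), Or.inl (Or.inr h), Or.inr (Or.inr h)],
           fun h => by rcases h with (h | h) | h | h
                       exacts [Or.inl (Or.inl h), Or.inr (Or.inl h), Or.inl (Or.inr h), Or.inr (Or.inr h)]⟩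

theorem pairs2_any_prefix (P : Int × Int → Bool) : ∀ (l m : List Int),
    (pairs2 l).any P = true → (pairs2 (l ++ m)).any P = true := by
  intro l
  induction l with
  | nil => intro m h; simp [pairs2] at h
  | cons x xs ih =>
    intro m h
    simp only [pairs2, List.cons_append, List.any_append, List.any_map, Bool.or_eq_true] at h ⊢
    rcases h with h | h
    · exact Or.inl (Or.inl h)
    · exact Or.inr (ih m h)

theorem badL_snoc (pairs : List (Int × Int)) (l : List Int) (v : Int) :
    badL pairs (l ++ [v]) = (badL pairs l || ((!pairs.isEmpty) && l.any (fun c => pairs.contains (c, v)))) := by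
  unfold badL
  rw [pairs2_any_snoc]
  cases pairs.isEmpty <;> cases (pairs2 l).any (fun c => pairs.contains c) <;>
    cases l.any (fun c => pairs.contains (c, v)) <;> rfl

theorem badL_append (pairs : List (Int × Int)) (l m : List Int) (h : badL pairs l = true) :
    badL pairs (l ++ m) = true := by
  unfold badL at h ⊢
  simp only [Bool.and_eq_true] at h ⊢
  exact ⟨h.1, pairs2_any_prefix _ l m h.2⟩

theorem pairs2_any_iff_not_pairwise (pairs : List (Int × Int)) : ∀ (l : List Int),
    ((pairs2 l).any (fun c => pairs.contains c) = true) ↔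
      ¬ l.Pairwise (fun a b => (a, b) ∉ pairs) := by
  intro l
  induction l with
  | nil => simp [pairs2]
  | cons x xs ih =>
    simp only [pairs2, List.any_append, List.any_map, List.pairwise_cons, Bool.or_eq_true,
      List.any_eq_true, Function.comp, List.contains_iff_mem, ih, not_and_or, not_forall]
    constructor
    · rintro (⟨y, hy, hp⟩ | h)
      · exact Or.inl ⟨y, hy, fun hn => hn hp⟩
      · exact Or.inr h
    · rintro (⟨y, hy, hp⟩ | h)
      · exact Or.inl ⟨y, hy, not_not.1 hp⟩
      · exact Or.inr h

theorem not_pairwise_length (pairs : List (Int × Int)) (l : List Int)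
    (h : ¬ l.Pairwise (fun a b => (a, b) ∉ pairs)) : 2 ≤ l.length := by
  match l with
  | [] => exact absurd List.Pairwise.nil h
  | [x] => exact absurd (List.pairwise_singleton _ _) h
  | x :: y :: t => simp

theorem not_pairwise_pairs_ne (pairs : List (Int × Int)) (l : List Int)
    (h : ¬ l.Pairwise (fun a b => (a, b) ∉ pairs)) : pairs.isEmpty = false := by
  have := (pairs2_any_iff_not_pairwise pairs l).2 h
  rcases List.any_eq_true.1 this with ⟨c, _, hc⟩
  cases pairs with
  | nil => simp at hc
  | cons _ _ => rfl

-- values of an index range -----------------------------------------------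

theorem valsP_intRange (pool : List Int) : ∀ (k b : Nat), b + k ≤ pool.length →
    valsP pool (intRange (b : Int) k) = (pool.drop b).take k := by
  intro k
  induction k with
  | zero => intro b h; simp [valsP, intRange]
  | succ k ih =>
    intro b h
    have hb : b < pool.length := by omega
    rw [intRange]
    simp only [valsP, List.map_cons]
    have h1 : PySem.List.pyGetD pool (b : Int) 0 = pool[b] := by
      rw [PySem.List.pyGetD_eq_getElem _ _ (by positivity) (by exact_mod_cast hb)]
      simp
    have h2 : (b : Int) + 1 = ((b + 1 : Nat) : Int) := by push_cast; ring
    rw [h1, h2]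
    have h3 := ih (b + 1) (by omega)
    simp only [valsP] at h3
    rw [h3, List.drop_eq_getElem_cons hb, List.take_succ_cons]

-- the inner reset loop `for j in range(i+1, r): indices[j] = indices[j-1] + 1` ----

theorem pyGetD_append_left (pre rest : List Int) (i : Int) (h0 : 0 ≤ i) (h : i < pre.length) :
    PySem.List.pyGetD (pre ++ rest) i 0 = PySem.List.pyGetD pre i 0 := by
  rw [PySem.List.pyGetD_eq_getElem _ _ h0 (by simp; omega),
      PySem.List.pyGetD_eq_getElem _ _ h0 (by exact_mod_cast h)]
  exact List.getElem_append_left (by omega)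

theorem pyGetD_append_length (pre : List Int) (y : Int) (ys : List Int) :
    PySem.List.pyGetD (pre ++ y :: ys) (pre.length : Int) 0 = y := by
  simp [PySem.List.pyGetD_natCast]

theorem set_append_length (pre : List Int) (y v : Int) (ys : List Int) :
    (pre ++ y :: ys).set pre.length v = pre ++ v :: ys := by
  rw [List.set_append]
  simp

theorem fillFold : ∀ (m : Nat) (pre2 tail : List Int) (b : Int), tail.length = m →
    1 ≤ pre2.length → PySem.List.pyGetD pre2 ((pre2.length : Int) - 1) 0 = b →
    (PySem.List.pyRange (pre2.length : Int) ((pre2.length : Int) + m) 1).foldl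
        (fun idx j => idx.set j.toNat (PySem.List.pyGetD idx (j - 1) 0 + 1)) (pre2 ++ tail)
      = pre2 ++ intRange (b + 1) m := by
  intro m
  induction m with
  | zero =>
    intro pre2 tail b htl _ _
    rw [List.length_eq_zero_iff.1 htl]
    have hr : PySem.List.pyRange ((pre2.length : Int)) ((pre2.length : Int) + ((0 : Nat) : Int)) 1 = [] :=
      PySem.List.pyRange_one_eq_nil (by push_cast; omega)
    rw [hr]
    simp [intRange]
  | succ m ih =>
    intro pre2 tail b htl hp hb
    cases tail with
    | nil => simp at htl
    | cons t ts =>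
      have hts : ts.length = m := by simpa using htl
      rw [PySem.List.pyRange_one_cons (a := (pre2.length : Int))
            (b := (pre2.length : Int) + ((m + 1 : Nat) : Int)) (by push_cast; omega)]
      rw [List.foldl_cons]
      have hget : PySem.List.pyGetD (pre2 ++ t :: ts) ((pre2.length : Int) - 1) 0 = b := by
        rw [pyGetD_append_left _ _ _ (by omega) (by omega)]
        exact hb
      have hset : (pre2 ++ t :: ts).set (pre2.length : Int).toNat
          (PySem.List.pyGetD (pre2 ++ t :: ts) ((pre2.length : Int) - 1) 0 + 1)
          = (pre2 ++ [b + 1]) ++ ts := by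
        rw [hget]
        have h1 : ((pre2.length : Int)).toNat = pre2.length := by omega
        rw [h1, set_append_length]
        simp
      rw [hset]
      have hlast : PySem.List.pyGetD (pre2 ++ [b + 1]) (((pre2 ++ [b + 1]).length : Int) - 1) 0 = b + 1 := by
        have h1 : ((pre2 ++ [b + 1]).length : Int) - 1 = (pre2.length : Int) := by simp
        rw [h1]
        exact pyGetD_append_length pre2 (b + 1) []
      have hih := ih (pre2 ++ [b + 1]) ts (b + 1) hts (by simp) hlast
      have harg : ((pre2 ++ [b + 1]).length : Int) = (pre2.length : Int) + 1 := by simp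
      rw [harg] at hih
      have harg2 : (pre2.length : Int) + 1 + (m : Int) = (pre2.length : Int) + ((m + 1 : Nat) : Int) := by
        push_cast; ring
      rw [harg2] at hih
      rw [hih, List.append_assoc]
      rfl

-- the break-scan + update of A's loop body, against nextF -------------------

theorem core {n : Int} : ∀ (is : List Int) (lo : Int) (pre : List Int), ValidFrom n lo is →
    (match nextF n is with
     | none =>
       ((PySem.List.pyRange (pre.length : Int) (((pre ++ is).length : Nat) : Int) 1).reverse).find?
         (fun i => decide (PySem.List.pyGetD (pre ++ is) i 0 ≠ i + n - ((pre ++ is).length : Int))) = none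
     | some is' =>
       ∃ i : Int,
         ((PySem.List.pyRange (pre.length : Int) (((pre ++ is).length : Nat) : Int) 1).reverse).find?
           (fun i => decide (PySem.List.pyGetD (pre ++ is) i 0 ≠ i + n - ((pre ++ is).length : Int))) = some i
         ∧ ((PySem.List.pyRange (i + 1) (((pre ++ is).length : Nat) : Int) 1).foldl
              (fun idx j => idx.set j.toNat (PySem.List.pyGetD idx (j - 1) 0 + 1))
              ((pre ++ is).set i.toNat (PySem.List.pyGetD (pre ++ is) i 0 + 1))) = pre ++ is') := by
  intro is
  induction is with
  | nil =>
    intro lo pre _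
    simp only [nextF, List.append_nil]
    rw [PySem.List.pyRange_one_eq_nil (by simp)]
    simp
  | cons i rest ih =>
    intro lo pre hv
    obtain ⟨h1, h2, h3⟩ := hv
    have hfull : pre ++ i :: rest = (pre ++ [i]) ++ rest := by simp
    have hlen : ((pre ++ i :: rest).length : Int) = ((pre ++ [i]) ++ rest).length := by rw [hfull]
    have hrange : PySem.List.pyRange (pre.length : Int) (((pre ++ i :: rest).length : Nat) : Int) 1
        = (pre.length : Int) :: PySem.List.pyRange ((pre.length : Int) + 1) (((pre ++ i :: rest).length : Nat) : Int) 1 := by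
      exact PySem.List.pyRange_one_cons (by simp)
    have hih := ih (i + 1) (pre ++ [i]) h3
    rw [nextF]
    cases hn : nextF n rest with
    | some rest' =>
      rw [hn] at hih
      obtain ⟨i0, hfind, hupd⟩ := hih
      refine ⟨i0, ?_, ?_⟩
      · rw [hrange]
        simp only [List.reverse_cons]
        rw [List.find?_append]
        have hst : ((pre.length : Int) + 1) = (((pre ++ [i]).length : Nat) : Int) := by simp
        rw [hst, hfull, hfind]
        rfl
      · rw [hfull, hupd]
        simp
    | none =>
      rw [hn] at hih
      have hfind_tail :
          ((PySem.List.pyRange ((pre.length : Int) + 1) (((pre ++ i :: rest).length : Nat) : Int) 1).reverse).find?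
            (fun j => decide (PySem.List.pyGetD (pre ++ i :: rest) j 0 ≠ j + n - ((pre ++ i :: rest).length : Int))) = none := by
        simpa using hih
      have hgetp : PySem.List.pyGetD (pre ++ i :: rest) ((pre.length : Int)) 0 = i :=
        pyGetD_append_length pre i rest
      have hbound : i + rest.length < n := valid_bound ⟨h1, h2, h3⟩
      have hrn : ((pre ++ i :: rest).length : Int) = (pre.length : Int) + 1 + rest.length := by
        simp; push_cast; ring
      by_cases hc : i + rest.length + 2 ≤ n
      · rw [if_pos hc]
        refine ⟨(pre.length : Int), ?_, ?_⟩
        · rw [hrange]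
          simp only [List.reverse_cons]
          rw [List.find?_append, hfind_tail]
          simp only [Option.none_or]
          rw [List.find?_cons]
          have : (decide (PySem.List.pyGetD (pre ++ i :: rest) ((pre.length : Int)) 0 ≠ (pre.length : Int) + n - ((pre ++ i :: rest).length : Int))) = true := by
            rw [hgetp, hrn]
            simp only [decide_eq_true_eq]
            omega
          rw [this]
        · have htoNat : ((pre.length : Int)).toNat = pre.length := by omega
          rw [htoNat, hgetp, set_append_length]
          have hset : pre ++ (i + 1) :: rest = (pre ++ [i + 1]) ++ rest := by simp
          rw [hset]
          have hlast : PySem.List.pyGetD (pre ++ [i + 1]) (((pre ++ [i + 1]).length : Int) - 1) 0 = i + 1 := by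
            have : ((pre ++ [i + 1]).length : Int) - 1 = (pre.length : Int) := by simp
            rw [this]
            exact pyGetD_append_length pre (i + 1) []
          have hf := fillFold rest.length (pre ++ [i + 1]) rest (i + 1) rfl (by simp) hlast
          have he1 : (((pre ++ [i + 1]).length : Nat) : Int) = (pre.length : Int) + 1 := by simp
          rw [he1] at hf
          have he2 : (pre.length : Int) + 1 + (rest.length : Int) = (((pre ++ i :: rest).length : Nat) : Int) := by
            rw [hrn]
          rw [he2] at hf
          rw [hf, List.append_assoc]
          rfl
      · rw [if_neg hc]
        rw [hrange]
        simp only [List.reverse_cons]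
        rw [List.find?_append, hfind_tail]
        simp only [Option.none_or]
        rw [List.find?_cons]
        have : (decide (PySem.List.pyGetD (pre ++ i :: rest) ((pre.length : Int)) 0 ≠ (pre.length : Int) + n - ((pre ++ i :: rest).length : Int))) = false := by
          rw [hgetp, hrn]
          simp only [decide_eq_false_iff_not, not_not]
          omega
        rw [this]
        rfl

theorem core_none {n : Int} {is : List Int} {lo : Int} (pre : List Int) (hv : ValidFrom n lo is)
    (h : nextF n is = none) :
    ((PySem.List.pyRange (pre.length : Int) (((pre ++ is).length : Nat) : Int) 1).reverse).find?
      (fun i => decide (PySem.List.pyGetD (pre ++ is) i 0 ≠ i + n - ((pre ++ is).length : Int))) = none := by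
  have hc := core is lo pre hv
  rw [h] at hc
  exact hc

theorem core_some {n : Int} {is is' : List Int} {lo : Int} (pre : List Int) (hv : ValidFrom n lo is)
    (h : nextF n is = some is') :
    ∃ i : Int,
      ((PySem.List.pyRange (pre.length : Int) (((pre ++ is).length : Nat) : Int) 1).reverse).find?
        (fun i => decide (PySem.List.pyGetD (pre ++ is) i 0 ≠ i + n - ((pre ++ is).length : Int))) = some i
      ∧ ((PySem.List.pyRange (i + 1) (((pre ++ is).length : Nat) : Int) 1).foldl
           (fun idx j => idx.set j.toNat (PySem.List.pyGetD idx (j - 1) 0 + 1))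
           ((pre ++ is).set i.toNat (PySem.List.pyGetD (pre ++ is) i 0 + 1))) = pre ++ is' := by
  have hc := core is lo pre hv
  rw [h] at hc
  exact hc

-- A's loop, characterised ---------------------------------------------------

theorem loopA_eq (pool : List Int) (pairs : List (Int × Int)) :
    ∀ (fuel : Nat) (is : List Int), ValidFrom (pool.length : Int) 0 is →
    (afterC (pool.length : Int) is).length < fuel →
    loopA pool (pool.length : Int) ((is.length : Nat) : Int) pairs is fuel
      = (afterC (pool.length : Int) is).filterMap
          (fun c => if badL pairs (valsP pool c) then none else some (valsP pool c)) := by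
  intro fuel
  induction fuel with
  | zero => intro is _ h; omega
  | succ fuel ih =>
    intro is hv hlt
    rw [loopA]
    cases hn : nextF (pool.length : Int) is with
    | none =>
      have hcore : ((PySem.List.pyRange 0 (is.length : Int) 1).reverse).find?
          (fun i => decide (PySem.List.pyGetD is i 0 ≠ i + (pool.length : Int) - (is.length : Int))) = none :=
        core_none (n := (pool.length : Int)) [] hv hn
      simp only [hcore, afterC_none hv hn]
      rfl
    | some is' =>
      obtain ⟨i0, hfind, hupd⟩ := core_some (n := (pool.length : Int)) [] hv hn
      have hfind' : ((PySem.List.pyRange 0 (is.length : Int) 1).reverse).find?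
          (fun i => decide (PySem.List.pyGetD is i 0 ≠ i + (pool.length : Int) - (is.length : Int))) = some i0 := hfind
      have hupd' : (PySem.List.pyRange (i0 + 1) (is.length : Int) 1).foldl
          (fun idx j => idx.set j.toNat (PySem.List.pyGetD idx (j - 1) 0 + 1))
          (is.set i0.toNat (PySem.List.pyGetD is i0 0 + 1)) = is' := hupd
      simp only [hfind']
      rw [hupd']
      have hlen' : is'.length = is.length := nextF_length hn
      have hv' : ValidFrom (pool.length : Int) 0 is' := valid_nextF hv hn
      have hstep := afterC_some hv hn
      have hih := ih is' hv' (by rw [hstep] at hlt; simp at hlt; omega)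
      rw [hlen'] at hih
      rw [hstep, List.filterMap_cons]
      have hfold : ((!pairs.isEmpty) && ((pairs2 (is'.map (fun k => PySem.List.pyGetD pool k 0))).any (fun c => pairs.contains c)))
          = badL pairs (valsP pool is') := rfl
      rw [hfold]
      by_cases hb : badL pairs (valsP pool is') = true
      · rw [if_pos hb, if_pos hb]
        simpa using hih
      · rw [if_neg hb, if_neg hb]
        rw [hih]
        rfl

-- B's DFS, characterised ----------------------------------------------------

theorem dfs_char (pool : List Int) (pairs : List (Int × Int)) (rI : Int) :
    ∀ (M : Nat) (fuel : Nat) (start : Int) (chosen : List Int),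
      ((pool.length : Int) + 1 - start).toNat ≤ M → 0 ≤ start → badL pairs chosen = false →
      rI - (chosen.length : Int) ≤ (fuel : Int) →
    dfsB pool pairs rI (pool.length : Int) fuel start chosen
      = (combsFrom (pool.length : Int) start (rI - chosen.length).toNat).filterMap
          (fun c => if badL pairs (chosen ++ valsP pool c) then none
                    else some (chosen ++ valsP pool c)) := by
  intro M
  induction M with
  | zero =>
    intro fuel start chosen hM h0 hbad hfuel
    have hs : (pool.length : Int) + 1 ≤ start := by omega
    cases fuel with
    | zero =>
      rw [dfsB]
      by_cases hk : rI - (chosen.length : Int) ≤ 0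
      · rw [if_pos hk]
        have hz : (rI - (chosen.length : Int)).toNat = 0 := by omega
        rw [hz]
        simp [combsFrom, valsP, hbad]
      · rw [if_neg hk]
        rw [combsFrom_eq_nil (by omega) (by omega)]
        simp
    | succ f =>
      rw [dfsB]
      by_cases hk : rI - (chosen.length : Int) ≤ 0
      · rw [if_pos hk]
        have hz : (rI - (chosen.length : Int)).toNat = 0 := by omega
        rw [hz]
        simp [combsFrom, valsP, hbad]
      · rw [if_neg hk]
        rw [combsFrom_eq_nil (by omega) (by omega)]
        rw [PySem.List.pyRange_one_eq_nil (by omega)]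
        simp
  | succ M ih =>
    intro fuel start chosen hM h0 hbad hfuel
    cases fuel with
    | zero =>
      rw [dfsB]
      by_cases hk : rI - (chosen.length : Int) ≤ 0
      · rw [if_pos hk]
        have hz : (rI - (chosen.length : Int)).toNat = 0 := by omega
        rw [hz]
        simp [combsFrom, valsP, hbad]
      · exfalso
        push_cast at hfuel
        omega
    | succ f =>
      rw [dfsB]
      by_cases hk : rI - (chosen.length : Int) ≤ 0
      · rw [if_pos hk]
        have hz : (rI - (chosen.length : Int)).toNat = 0 := by omega
        rw [hz]
        simp [combsFrom, valsP, hbad]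
      · rw [if_neg hk]
        have hk1 : 1 ≤ rI - (chosen.length : Int) := by omega
        by_cases hle : start + (rI - (chosen.length : Int)) ≤ (pool.length : Int)
        · -- nonempty range
          have hcons : PySem.List.pyRange start ((pool.length : Int) - (rI - (chosen.length : Int)) + 1) 1
              = start :: PySem.List.pyRange (start + 1) ((pool.length : Int) - (rI - (chosen.length : Int)) + 1) 1 :=
            PySem.List.pyRange_one_cons (by omega)
          rw [hcons, List.flatMap_cons]
          -- rest of the loop = dfsB at start+1 with the same chosen (and the same fuel)
          have hrest : (PySem.List.pyRange (start + 1) ((pool.length : Int) - (rI - (chosen.length : Int)) + 1) 1).flatMap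
                (fun idx =>
                  let v := PySem.List.pyGetD pool idx 0
                  if (!pairs.isEmpty) && (chosen.any (fun c => pairs.contains (c, v))) then []
                  else dfsB pool pairs rI (pool.length : Int) f (idx + 1) (chosen ++ [v]))
              = dfsB pool pairs rI (pool.length : Int) (f + 1) (start + 1) chosen := by
            rw [dfsB, if_neg (by omega)]
          rw [hrest]
          -- expand the combsFrom on the RHS before touching the rest part
          obtain ⟨kN', hkN⟩ : ∃ m, (rI - (chosen.length : Int)).toNat = m + 1 := ⟨(rI - (chosen.length : Int)).toNat - 1, by omega⟩
          rw [hkN, combsFrom, dif_neg (by omega), List.filterMap_append]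
          congr 1
          · -- head branch vs map part
            rw [List.filterMap_map]
            set v : Int := PySem.List.pyGetD pool start 0 with hv
            have hsnoc := badL_snoc pairs chosen v
            rw [hbad] at hsnoc
            simp only [Bool.false_or] at hsnoc
            by_cases hc : ((!pairs.isEmpty) && (chosen.any (fun c => pairs.contains (c, v)))) = true
            · rw [if_pos hc]
              symm
              rw [List.filterMap_eq_nil_iff]
              intro c _
              have hcb : badL pairs (chosen ++ valsP pool (start :: c)) = true := by
                have he : chosen ++ valsP pool (start :: c) = (chosen ++ [v]) ++ valsP pool c := by
                  simp [valsP, hv]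
                rw [he]
                apply badL_append
                rw [hsnoc, hc]
              simp only [Function.comp]
              rw [hcb]
              rfl
            · have hcf : ((!pairs.isEmpty) && (chosen.any (fun c => pairs.contains (c, v)))) = false := by
                revert hc; cases ((!pairs.isEmpty) && (chosen.any (fun c => pairs.contains (c, v)))) <;> simp
              rw [if_neg (by rw [hcf]; simp)]
              have hbad' : badL pairs (chosen ++ [v]) = false := by rw [hsnoc, hcf]
              have hlen' : (rI - ((chosen ++ [v]).length : Int)).toNat = kN' := by
                simp; omega
              have hihc := ih f (start + 1) (chosen ++ [v]) (by omega) (by omega) hbad'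
                (by simp; push_cast; omega)
              rw [hlen'] at hihc
              rw [hihc]
              apply List.filterMap_congr
              intro c _
              simp only [Function.comp]
              have he : chosen ++ valsP pool (start :: c) = (chosen ++ [v]) ++ valsP pool c := by
                simp [valsP, hv]
              rw [he]
          · -- tail: rest of the loop
            have hihr := ih (f + 1) (start + 1) chosen (by omega) (by omega) hbad hfuel
            rw [hkN] at hihr
            exact hihr
        · -- empty range: both sides nil
          rw [PySem.List.pyRange_one_eq_nil (by omega)]
          rw [combsFrom_eq_nil (by omega) (by omega)]
          simp

-- pyRange as intRange -------------------------------------------------------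

theorem pyRange_eq_intRange : ∀ (k : Nat) (a : Int), PySem.List.pyRange a (a + k) 1 = intRange a k := by
  intro k
  induction k with
  | zero => intro a; simp [intRange, PySem.List.pyRange_one_eq_nil]
  | succ k ih =>
    intro a
    rw [PySem.List.pyRange_one_cons (by omega)]
    rw [intRange]
    have : a + ((k + 1 : Nat) : Int) = (a + 1) + (k : Int) := by push_cast; ring
    rw [this, ih (a + 1)]

-- characterisations of the two ports ---------------------------------------

theorem portA_char (iterable : List Int) (r : Int) (pairs : List (Int × Int))
    (hr0 : 0 < r) (hrn : r ≤ (iterable.length : Int)) :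
    conditional_combinations iterable r pairs
      = valsP iterable (intRange 0 r.toNat)
        :: (afterC (iterable.length : Int) (intRange 0 r.toNat)).filterMap
            (fun c => if badL pairs (valsP iterable c) then none else some (valsP iterable c)) := by
  unfold conditional_combinations
  rw [if_neg (by omega)]
  have hpr : PySem.List.pyRange 0 r 1 = intRange 0 r.toNat := by
    have h := pyRange_eq_intRange r.toNat 0
    rw [show (0 : Int) + (r.toNat : Int) = r by omega] at h
    exact h
  have hC : combsFrom (iterable.length : Int) 0 r.toNat
      = intRange 0 r.toNat :: afterC (iterable.length : Int) (intRange 0 r.toNat) :=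
    combsFrom_eq_cons (by omega)
  have hvalid : ValidFrom (iterable.length : Int) 0 (intRange 0 r.toNat) :=
    valid_intRange (by omega)
  have hchoose : (afterC (iterable.length : Int) (intRange 0 r.toNat)).length
      < Nat.choose iterable.length r.toNat + 1 := by
    have h1 := combsFrom_length (iterable.length : Int) 0 r.toNat
    rw [hC] at h1
    simp only [List.length_cons] at h1
    have h2 : ((iterable.length : Int) - 0).toNat = iterable.length := by omega
    rw [h2] at h1
    omega
  have hrI : ((intRange (0 : Int) r.toNat).length : Int) = r := by
    rw [intRange_length]; omega
  have hl := loopA_eq iterable pairs (Nat.choose iterable.length r.toNat + 1)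
      (intRange 0 r.toNat) hvalid hchoose
  rw [hrI] at hl
  have hn : ((iterable.length : Int)).toNat = iterable.length := by omega
  simp only [hpr, hn]
  rw [hl]
  rfl

theorem portB_char (iterable : List Int) (r : Int) (pairs : List (Int × Int))
    (hrn : r ≤ (iterable.length : Int)) :
    conditional_combinations_alt iterable r pairs
      = (combsFrom (iterable.length : Int) 0 r.toNat).filterMap
          (fun c => if badL pairs (valsP iterable c) then none else some (valsP iterable c)) := by
  unfold conditional_combinations_alt
  rw [if_neg (by omega)]
  have hbadnil : badL pairs ([] : List Int) = false := by
    simp [badL, pairs2]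
  have h := dfs_char iterable pairs r (((iterable.length : Int) + 1 - 0).toNat) r.toNat 0 []
      (le_refl _) (le_refl _) hbadnil
      (by simp only [List.length_nil, Nat.cast_zero, Int.sub_zero]; omega)
  simp only [List.length_nil, Nat.cast_zero, Int.sub_zero, List.nil_append] at h
  rw [h]

theorem badL_first (iterable : List Int) (r : Int) (pairs : List (Int × Int))
    (hr0 : 0 < r) (hrn : r ≤ (iterable.length : Int)) :
    badL pairs (valsP iterable (intRange 0 r.toNat))
      = ((!pairs.isEmpty) && ((pairs2 (iterable.take r.toNat)).any (fun c => pairs.contains c))) := by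
  have hv : valsP iterable (intRange (0 : Int) r.toNat) = iterable.take r.toNat := by
    have h := valsP_intRange iterable r.toNat 0 (by omega)
    simpa using h
  rw [hv, badL]

-- ===== VERDICT (by name: the statement is the Claim_ definition above) =====

theorem conditional_combinations_spec : Claim_unchanged_conditional_combinations := by
  unfold Claim_unchanged_conditional_combinations
  intro iterable r pairs _ hnd
  by_cases hr : r > (iterable.length : Int)
  · unfold conditional_combinations conditional_combinations_alt
    rw [if_pos hr, if_pos hr]
  · push_neg at hr
    by_cases hr0 : r ≤ 0
    · -- r ≤ 0: both return [[]]
      simp only [conditional_combinations, conditional_combinations_alt]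
      rw [if_neg (by omega), if_neg (by omega)]
      have h0 : r.toNat = 0 := by omega
      rw [h0, dfsB, if_pos (by simp; omega), loopA]
      rw [PySem.List.pyRange_one_eq_nil hr0]
      simp
    · push_neg at hr0
      have hpw : (iterable.take r.toNat).Pairwise (fun a b => (a, b) ∉ pairs) := by
        by_contra h
        exact hnd ⟨hr, h⟩
      have hany : (pairs2 (iterable.take r.toNat)).any (fun c => pairs.contains c) = false := by
        by_contra h
        exact ((pairs2_any_iff_not_pairwise pairs _).1 (by revert h; cases (pairs2 (iterable.take r.toNat)).any (fun c => pairs.contains c) <;> simp)) hpw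
      rw [portA_char iterable r pairs hr0 hr, portB_char iterable r pairs hr]
      rw [combsFrom_eq_cons (by omega), List.filterMap_cons]
      rw [badL_first iterable r pairs hr0 hr, hany]
      simp

theorem conditional_combinations_changed : Claim_changed_conditional_combinations := by
  unfold Claim_changed_conditional_combinations; decide

theorem conditional_combinations_tight : Claim_exact_conditional_combinations := by
  unfold Claim_exact_conditional_combinations
  intro iterable r pairs _ hd
  obtain ⟨hr, hnpw⟩ := hd
  have hany : (pairs2 (iterable.take r.toNat)).any (fun c => pairs.contains c) = true :=
    (pairs2_any_iff_not_pairwise pairs _).2 hnpw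
  have hlen2 : 2 ≤ (iterable.take r.toNat).length := not_pairwise_length pairs _ hnpw
  have hr0 : 0 < r := by
    simp at hlen2
    omega
  have hne : pairs.isEmpty = false := not_pairwise_pairs_ne pairs _ hnpw
  rw [portA_char iterable r pairs hr0 hr, portB_char iterable r pairs hr]
  rw [combsFrom_eq_cons (by omega), List.filterMap_cons]
  rw [badL_first iterable r pairs hr0 hr, hany, hne]
  simp only [Bool.not_false, Bool.true_and, if_pos]
  intro h
  have := congrArg List.length h
  simp at this
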